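-- pv_equiv track=rewrite | github.com/SartoRiccardo/pandehelper-bot | bot/utils/ctmap.py | tile_to_coords
-- ===== SOURCE A (Python) =====
-- def tile_to_coords(tile_code: str, map_radius: int = 7, team_pov: int = 0) -> tuple[int, int, int]:
--     """
--     First letter is which spawn the tile is closest to (A -> G counterclockwise).
--     Second letter is how far horizontally it goes.
--     Third letter is how far it is from MRX.
--
--     Hexagonal grid coord reference:
--     - https://www.redblobgames.com/grids/hexagons/#distances
--     - https://www.redblobgames.com/grids/hexagons/#rotation
--     """
--     if len(tile_code) < 3:
--         raise ValueError()
--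
--     tile_code = tile_code.upper()
--     if tile_code == "MRX":
--         return 0, 0, 0
--     # FAH edge case
--     if tile_code.startswith("FA") and ord(tile_code[2]) >= ord("H"):
--         tile_code = tile_code[:2] + chr(ord(tile_code[2])-1)
--
--     rotations = (ord(tile_code[0])-ord("A")-team_pov) % 6
--     dist_from_center = map_radius - (ord(tile_code[2])-ord("A"))
--     dist_from_radius = int((ord(tile_code[1])-ord("A")+1) / 2)
--     qrs = (0, dist_from_center, -dist_from_center)
--     if (ord(tile_code[1])-ord("A")) % 2 == 0:  # Move right
--         qrs = (qrs[0]-dist_from_radius, qrs[1], qrs[2]+dist_from_radius)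
--     else:
--         qrs = (qrs[0]+dist_from_radius, qrs[1]-dist_from_radius, qrs[2])
--
--     for _ in range(rotations):
--         qrs = (-qrs[2], -qrs[0], -qrs[1])
--
--     return qrs
-- ===== SOURCE B (Python) =====
-- def tile_to_coords(tile_code: str, map_radius: int = 7, team_pov: int = 0) -> tuple[int, int, int]:
--     if len(tile_code) < 3:
--         raise ValueError()
--     tile_code = tile_code.upper()
--     if tile_code == "MRX":
--         return 0, 0, 0
--     a, b, c = ord(tile_code[0]), ord(tile_code[1]), ord(tile_code[2])
--     if (a, b) == (70, 65) and c >= 72: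
--         c -= 1  # column H is skipped on the FA ring
--     d = map_radius - (c - 65)
--     h = int((b - 64) / 2)
--     if (b - 65) % 2 == 0:
--         base = [-h, d, h - d]
--     else:
--         base = [h, d - h, -d]
--     # Rotating a cube coordinate 60 degrees k times decomposes into a sign
--     # flip (-1)^k and a cyclic shift of the triple by (2k mod 3) positions.
--     k = (a - 65 - team_pov) % 6
--     sign = -1 if k % 2 else 1
--     shift = (2 * k) % 3
--     return tuple(sign * base[(i + shift) % 3] for i in range(3))
-- ===== Notes on version B (the rewrite author's own statement) =====
-- stated objective: alternative
-- what changed: Replaces the iterative 60-degree rotation loop with a group-theoretic decomposition: rotating k times equals a sign flip (-1)^k combined with a cyclic shift of the triple by (2k mod 3), so B computes sign and shift arithmetically and indexes the base triple cyclically; the base triple is also built directly in the parity branch instead of adjusting an intermediate tuple.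
import Mathlib
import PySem

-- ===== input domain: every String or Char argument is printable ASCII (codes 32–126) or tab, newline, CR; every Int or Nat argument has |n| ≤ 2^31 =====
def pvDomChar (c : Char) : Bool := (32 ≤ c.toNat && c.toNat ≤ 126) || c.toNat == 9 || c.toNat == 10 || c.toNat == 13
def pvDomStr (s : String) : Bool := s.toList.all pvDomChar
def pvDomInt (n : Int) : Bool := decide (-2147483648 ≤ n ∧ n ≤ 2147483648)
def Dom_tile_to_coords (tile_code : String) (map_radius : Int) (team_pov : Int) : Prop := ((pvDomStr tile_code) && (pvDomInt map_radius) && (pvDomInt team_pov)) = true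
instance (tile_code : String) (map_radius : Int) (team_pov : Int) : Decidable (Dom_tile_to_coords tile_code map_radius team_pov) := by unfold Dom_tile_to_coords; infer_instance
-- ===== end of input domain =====

-- B replaces A's iterative rotation loop by the group decomposition
-- rot^k = (-1)^k · cyclic-shift-by-(2k mod 3) and builds the base triple
-- directly (objective: alternative). Pre_ excludes len(tile_code) < 3,
-- on which A raises ValueError.

-- ===== PORT A =====
-- Literal port of A.  len < 3 raises ValueError in Python (excluded by Pre_).
-- int((…)/2) on these small exact integers is truncation toward zero = Int.tdiv.
def tile_to_coords (tile_code : String) (map_radius : Int) (team_pov : Int) : Int × Int × Int :=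
  if tile_code.toList.length < 3 then (0, 0, 0)  -- ValueError in Python; outside Pre_
  else
    let cs := (PySem.Str.upper tile_code).toList
    if cs = ['M', 'R', 'X'] then (0, 0, 0)
    else
      -- FAH edge case: tile_code.startswith("FA") and ord(tile_code[2]) >= ord("H")
      let c0 : Int := (cs.getD 0 ' ').toNat
      let c1 : Int := (cs.getD 1 ' ').toNat
      let c2raw : Int := (cs.getD 2 ' ').toNat
      let c2 : Int := if c0 = 70 ∧ c1 = 65 ∧ 72 ≤ c2raw then c2raw - 1 else c2raw
      let rotations : Int := PySem.Int.mod (c0 - 65 - team_pov) 6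
      let dist_from_center : Int := map_radius - (c2 - 65)
      let dist_from_radius : Int := Int.tdiv (c1 - 65 + 1) 2
      let qrs : Int × Int × Int := (0, dist_from_center, -dist_from_center)
      let qrs : Int × Int × Int :=
        if PySem.Int.mod (c1 - 65) 2 = 0 then
          (qrs.1 - dist_from_radius, qrs.2.1, qrs.2.2 + dist_from_radius)
        else
          (qrs.1 + dist_from_radius, qrs.2.1 - dist_from_radius, qrs.2.2)
      (List.range rotations.toNat).foldl (fun p _ => (-p.2.2, -p.1, -p.2.1)) qrs

-- ===== PORT B =====
-- Literal port of Source B: same guards, direct base triple, then sign/shift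
-- decomposition of the rotation with cyclic indexing into the base list.
def tile_to_coords_alt (tile_code : String) (map_radius : Int) (team_pov : Int) : Int × Int × Int :=
  if tile_code.toList.length < 3 then (0, 0, 0)  -- ValueError in Python; outside Pre_
  else
    let cs := (PySem.Str.upper tile_code).toList
    if cs = ['M', 'R', 'X'] then (0, 0, 0)
    else
      let a : Int := (cs.getD 0 ' ').toNat
      let b : Int := (cs.getD 1 ' ').toNat
      let craw : Int := (cs.getD 2 ' ').toNat
      let c : Int := if a = 70 ∧ b = 65 ∧ 72 ≤ craw then craw - 1 else craw
      let d : Int := map_radius - (c - 65)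
      let h : Int := Int.tdiv (b - 64) 2   -- int((b-64)/2): exact toward-zero division
      let base : List Int :=
        if PySem.Int.mod (b - 65) 2 = 0 then [-h, d, h - d] else [h, d - h, -d]
      let k : Int := PySem.Int.mod (a - 65 - team_pov) 6
      let sign : Int := if PySem.Int.mod k 2 = 0 then 1 else -1
      let shift : Int := PySem.Int.mod (2 * k) 3
      (sign * base.getD (PySem.Int.mod (0 + shift) 3).toNat 0,
       sign * base.getD (PySem.Int.mod (1 + shift) 3).toNat 0,
       sign * base.getD (PySem.Int.mod (2 + shift) 3).toNat 0)

-- ===== PRECONDITION & SPEC =====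
-- Pre_ excludes exactly the inputs with len(tile_code) < 3, on which A raises ValueError.
def Pre_tile_to_coords (tile_code : String) (map_radius : Int) (team_pov : Int) : Prop :=
  3 ≤ tile_code.toList.length
instance (tile_code : String) (map_radius : Int) (team_pov : Int) : Decidable (Pre_tile_to_coords tile_code map_radius team_pov) := by unfold Pre_tile_to_coords; infer_instance
def pvWitness_tile_to_coords : String × Int × Int := ("DBC", 7, 0)

def Spec_tile_to_coords (tile_code : String) (map_radius : Int) (team_pov : Int) (out : Int × Int × Int) : Prop := out = tile_to_coords_alt tile_code map_radius team_pov
instance (tile_code : String) (map_radius : Int) (team_pov : Int) (out : Int × Int × Int) : Decidable (Spec_tile_to_coords tile_code map_radius team_pov out) := by unfold Spec_tile_to_coords; infer_instance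

-- ===== CLAIM =====
def Claim_equal_tile_to_coords : Prop := ∀ (tile_code : String) (map_radius : Int) (team_pov : Int), Dom_tile_to_coords tile_code map_radius team_pov → Pre_tile_to_coords tile_code map_radius team_pov → Spec_tile_to_coords tile_code map_radius team_pov (tile_to_coords tile_code map_radius team_pov)

-- ===== LEMMAS AND PROOFS =====

-- the rotation loop applied k (0 ≤ k < 6) times equals (-1)^k · cyclic shift by (2k mod 3)
theorem rot_fold_eq (k : Int) (hk0 : 0 ≤ k) (hk : k < 6) (q r s : Int) :
    (List.range k.toNat).foldl (fun p (_ : Nat) => (-p.2.2, -p.1, -p.2.1)) (q, r, s) =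
      (let base : List Int := [q, r, s]
       let sign : Int := if PySem.Int.mod k 2 = 0 then 1 else -1
       let shift : Int := PySem.Int.mod (2 * k) 3
       (sign * base.getD (PySem.Int.mod (0 + shift) 3).toNat 0,
        sign * base.getD (PySem.Int.mod (1 + shift) 3).toNat 0,
        sign * base.getD (PySem.Int.mod (2 + shift) 3).toNat 0)) := by
  interval_cases k <;>
    simp [List.range_succ, PySem.Int.mod]

-- the common core, character codes generalized to integers
theorem key_core (A B C mr tp : Int) :
    (let c2 : Int := if A = 70 ∧ B = 65 ∧ 72 ≤ C then C - 1 else C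
     let rotations : Int := PySem.Int.mod (A - 65 - tp) 6
     let dist_from_center : Int := mr - (c2 - 65)
     let dist_from_radius : Int := Int.tdiv (B - 65 + 1) 2
     let qrs : Int × Int × Int := (0, dist_from_center, -dist_from_center)
     let qrs : Int × Int × Int :=
       if PySem.Int.mod (B - 65) 2 = 0 then
         (qrs.1 - dist_from_radius, qrs.2.1, qrs.2.2 + dist_from_radius)
       else
         (qrs.1 + dist_from_radius, qrs.2.1 - dist_from_radius, qrs.2.2)
     (List.range rotations.toNat).foldl (fun p _ => (-p.2.2, -p.1, -p.2.1)) qrs)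
    =
    (let c : Int := if A = 70 ∧ B = 65 ∧ 72 ≤ C then C - 1 else C
     let d : Int := mr - (c - 65)
     let h : Int := Int.tdiv (B - 64) 2
     let base : List Int :=
       if PySem.Int.mod (B - 65) 2 = 0 then [-h, d, h - d] else [h, d - h, -d]
     let k : Int := PySem.Int.mod (A - 65 - tp) 6
     let sign : Int := if PySem.Int.mod k 2 = 0 then 1 else -1
     let shift : Int := PySem.Int.mod (2 * k) 3
     (sign * base.getD (PySem.Int.mod (0 + shift) 3).toNat 0,
      sign * base.getD (PySem.Int.mod (1 + shift) 3).toNat 0,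
      sign * base.getD (PySem.Int.mod (2 + shift) 3).toNat 0)) := by
  dsimp only
  have hx : B - 65 + 1 = B - 64 := by ring
  rw [hx]
  have hk0 : 0 ≤ PySem.Int.mod (A - 65 - tp) 6 := PySem.Int.mod_nonneg _ (by norm_num)
  have hk6 : PySem.Int.mod (A - 65 - tp) 6 < 6 := PySem.Int.mod_lt _ (by norm_num)
  set c : Int := if A = 70 ∧ B = 65 ∧ 72 ≤ C then C - 1 else C with hc
  set t : Int := Int.tdiv (B - 64) 2 with ht
  set d : Int := mr - (c - 65) with hd
  by_cases hp : PySem.Int.mod (B - 65) 2 = 0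
  · simp only [hp, if_true]
    have := rot_fold_eq (PySem.Int.mod (A - 65 - tp) 6) hk0 hk6 (0 - t) d (-d + t)
    rw [this]
    have h3 : -d + t = t - d := by ring
    have h0 : (0 : Int) - t = -t := by ring
    rw [h3, h0]
  · simp only [hp, if_false]
    have := rot_fold_eq (PySem.Int.mod (A - 65 - tp) 6) hk0 hk6 (0 + t) (d - t) (-d)
    rw [this]
    have h0 : (0 : Int) + t = t := by ring
    rw [h0]

-- ===== VERDICT =====
theorem tile_to_coords_spec : Claim_equal_tile_to_coords := by
  intro tc mr tp _ hpre
  unfold Spec_tile_to_coords tile_to_coords tile_to_coords_alt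
  have hlen : ¬ tc.toList.length < 3 := by
    unfold Pre_tile_to_coords at hpre; omega
  simp only [hlen, if_false]
  by_cases hm : (PySem.Str.upper tc).toList = ['M', 'R', 'X']
  · simp only [hm, if_true]
  · simp only [hm, if_false]
    exact key_core _ _ _ _ _
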